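-- pv_equiv track=rewrite | github.com/ShivaBP/DD2440-AdvancedAlgorithms | Minimum Spanning Forest/Implementation/approximateMST.py | getNeighborWeight
-- ===== SOURCE A (Python) =====
-- def getNeighborWeight (vertexInfo , neighbor ):
--
--     weight = 0
--
--     for i in range (1, (len(vertexInfo) -1 ) ):
--
--         if (vertexInfo[i] == neighbor):
--             weight =  vertexInfo[i+1]
--         else:
--             i =  i+2
--
--     return int(weight)
-- ===== SOURCE B (Python) =====
-- def getNeighborWeight(vertexInfo, neighbor):
--     # Scan the index range backwards and return at the FIRST match found;
--     # since A keeps overwriting with later matches, the first match seen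
--     # from the back is exactly A's last-match result.
--     for i in range(len(vertexInfo) - 2, 0, -1):
--         if vertexInfo[i] == neighbor:
--             return int(vertexInfo[i + 1])
--     return 0
-- ===== Notes on version B (the rewrite author's own statement) =====
-- stated objective: alternative
-- what changed: Replaces A's full forward pass with a running last-match accumulator by a backward scan with an early return at the first match found from the end (equivalent because last match forward = first match backward); the 0 default falls out when no index matches.
import Mathlib
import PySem

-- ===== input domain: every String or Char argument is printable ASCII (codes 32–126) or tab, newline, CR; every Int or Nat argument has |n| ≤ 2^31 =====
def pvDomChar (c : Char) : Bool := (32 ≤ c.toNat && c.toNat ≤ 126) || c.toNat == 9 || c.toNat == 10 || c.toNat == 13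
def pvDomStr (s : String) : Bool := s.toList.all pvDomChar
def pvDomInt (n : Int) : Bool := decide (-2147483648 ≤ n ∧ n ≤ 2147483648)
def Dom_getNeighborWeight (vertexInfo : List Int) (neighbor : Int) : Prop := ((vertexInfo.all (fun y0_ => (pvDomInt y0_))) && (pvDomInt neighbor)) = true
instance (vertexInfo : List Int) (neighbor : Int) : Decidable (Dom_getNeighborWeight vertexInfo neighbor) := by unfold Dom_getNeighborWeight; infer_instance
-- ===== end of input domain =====

-- B replaces A's full forward pass with accumulator by a backward scan with early return at the first match (alternative, same behaviour).

-- ===== PORT A =====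
-- Literal port of A: weight accumulator over range(1, len-1), last match wins.
def getNeighborWeight (vertexInfo : List Int) (neighbor : Int) : Int :=
  (PySem.List.pyRange 1 ((vertexInfo.length : Int) - 1) 1).foldl
    (fun weight i =>
      if PySem.List.pyGetD vertexInfo i 0 = neighbor then
        PySem.List.pyGetD vertexInfo (i + 1) 0
      else weight)
    0

-- ===== PORT B =====
-- Port of B's loop body: walk the countdown index list, return on first match, 0 if none.
def getNeighborWeightAltLoop (vertexInfo : List Int) (neighbor : Int) : List Int → Int
  | [] => 0
  | i :: rest =>
      if PySem.List.pyGetD vertexInfo i 0 = neighbor then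
        PySem.List.pyGetD vertexInfo (i + 1) 0
      else getNeighborWeightAltLoop vertexInfo neighbor rest

-- Port of B: for i in range(len-2, 0, -1): early return at first match.
def getNeighborWeight_alt (vertexInfo : List Int) (neighbor : Int) : Int :=
  getNeighborWeightAltLoop vertexInfo neighbor
    (PySem.List.pyRange ((vertexInfo.length : Int) - 2) 0 (-1))

-- ===== PRECONDITION & SPEC =====
def Spec_getNeighborWeight (vertexInfo : List Int) (neighbor : Int) (out : Int) : Prop := out = getNeighborWeight_alt vertexInfo neighbor
instance (vertexInfo : List Int) (neighbor : Int) (out : Int) : Decidable (Spec_getNeighborWeight vertexInfo neighbor out) := by unfold Spec_getNeighborWeight; infer_instance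

-- ===== CLAIM =====
def Claim_equal_getNeighborWeight : Prop := ∀ (vertexInfo : List Int) (neighbor : Int), Dom_getNeighborWeight vertexInfo neighbor → Spec_getNeighborWeight vertexInfo neighbor (getNeighborWeight vertexInfo neighbor)

-- ===== LEMMAS AND PROOFS =====

-- The backward scan generalized with an explicit fall-through value.
def revScan (vertexInfo : List Int) (neighbor : Int) (w : Int) : List Int → Int
  | [] => w
  | i :: rest =>
      if PySem.List.pyGetD vertexInfo i 0 = neighbor then
        PySem.List.pyGetD vertexInfo (i + 1) 0
      else revScan vertexInfo neighbor w rest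

theorem altLoop_eq_revScan (v : List Int) (n : Int) (l : List Int) :
    getNeighborWeightAltLoop v n l = revScan v n 0 l := by
  induction l with
  | nil => rfl
  | cons a t ih => simp [getNeighborWeightAltLoop, revScan, ih]

theorem revScan_append (v : List Int) (n w : Int) (xs ys : List Int) :
    revScan v n w (xs ++ ys) = revScan v n (revScan v n w ys) xs := by
  induction xs with
  | nil => rfl
  | cons a t ih => simp [revScan, ih]

-- A's forward last-match fold equals the backward first-match scan on the reversed list.
theorem foldl_eq_revScan_reverse (v : List Int) (n : Int) (l : List Int) (w : Int) :
    l.foldl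
      (fun weight i =>
        if PySem.List.pyGetD v i 0 = n then PySem.List.pyGetD v (i + 1) 0 else weight)
      w
    = revScan v n w l.reverse := by
  induction l generalizing w with
  | nil => rfl
  | cons a t ih =>
      simp only [List.foldl_cons, List.reverse_cons, revScan_append, ih]
      by_cases h : PySem.List.pyGetD v a 0 = n <;> simp [revScan, h]

-- ===== VERDICT =====
theorem getNeighborWeight_spec : Claim_equal_getNeighborWeight := by
  intro vertexInfo neighbor _
  unfold Spec_getNeighborWeight getNeighborWeight getNeighborWeight_alt
  rw [foldl_eq_revScan_reverse, altLoop_eq_revScan,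
    PySem.List.pyRange_neg_one_eq_reverse]
  have h : (vertexInfo.length : Int) - 2 + 1 = (vertexInfo.length : Int) - 1 := by ring
  rw [h]
  norm_num
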